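-- pv_equiv track=rewrite | github.com/radical-cybertools/rhapsody | src/rhapsody/resource_manager/base.py | _minimal_prefix
-- ===== SOURCE A (Python) =====
-- def _minimal_prefix(run: list[str]) -> str:
--     """Find shortest prefix where suffixes remain consecutive integers."""
--     width = len(run[0])
--
--     for plen in range(width - 1, -1, -1):
--         suffixes = [n[plen:] for n in run]
--         # Check uniform width and consecutive values
--         if len(set(len(s) for s in suffixes)) == 1:
--             vals = [int(s) for s in suffixes]
--             if all(vals[i + 1] == vals[i] + 1 for i in range(len(vals) - 1)):
--                 return run[0][:plen]
--     return ""
-- ===== SOURCE B (Python) =====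
-- def _minimal_prefix(run: list[str]) -> str:
--     """Find shortest prefix where suffixes remain consecutive integers."""
--     width = len(run[0])
--     if any(len(s) != width for s in run):
--         return ""
--     # candidate cut positions, pair-major: each adjacent pair filters out the
--     # cuts at which its two suffixes do not step by exactly one
--     ok = [p for p in range(width) if _parses(run[0], p)]
--     for a, b in zip(run, run[1:]):
--         ok = [p for p in ok if _step(a, b, p)]
--     return run[0][:ok[-1]] if ok else ""
--
-- def _parses(s, p):
--     try:
--         int(s[p:])
--         return True
--     except ValueError:
--         return False
--
-- def _step(a, b, p):
--     try:
--         return int(b[p:]) == int(a[p:]) + 1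
--     except ValueError:
--         return False
-- ===== Notes on version B (the rewrite author's own statement) =====
-- stated objective: faster
-- what changed: B transposes the iteration: instead of scanning cut positions right-to-left and re-checking every adjacent pair at each cut, it starts from the candidate cuts whose first-entry suffix parses and lets each adjacent pair filter out the cuts where its suffixes do not step by one, answering with the largest surviving cut; the surviving-cut list shrinks after the first pair, so later pairs do only O(|ok|) work, and A's per-cut suffix-width set test is replaced by one upfront width check.
import Mathlib
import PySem

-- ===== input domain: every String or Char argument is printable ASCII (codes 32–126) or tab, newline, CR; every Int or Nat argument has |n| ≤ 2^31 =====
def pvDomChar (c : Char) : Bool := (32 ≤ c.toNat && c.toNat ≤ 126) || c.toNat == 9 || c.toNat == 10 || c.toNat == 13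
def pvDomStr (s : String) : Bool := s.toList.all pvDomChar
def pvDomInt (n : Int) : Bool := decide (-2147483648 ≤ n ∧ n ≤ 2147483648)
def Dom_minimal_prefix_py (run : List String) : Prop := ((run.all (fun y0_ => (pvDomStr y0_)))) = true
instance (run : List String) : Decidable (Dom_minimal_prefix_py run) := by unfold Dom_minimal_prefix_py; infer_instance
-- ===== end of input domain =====

-- B iterates pair-major instead of cut-major: each adjacent pair filters the list of
-- candidate cut positions, the answer is the largest surviving cut. Equivalence is
-- claimed on Pre_ (exactly the inputs where A returns instead of raising).

-- ===== PORT A =====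
-- all(vals[i+1] == vals[i] + 1 for i in range(len(vals) - 1))
def pvAconsec (vals : List Int) : Bool :=
  (PySem.List.pyRange 0 ((vals.length : Int) - 1) 1).all
    (fun i => PySem.List.pyGetD vals (i + 1) 0 == PySem.List.pyGetD vals i 0 + 1)

-- the 'for plen in range(width-1, -1, -1)' loop of A, one constructor per iteration
def pvAloop (run : List String) (first : String) : List Int → String
  | [] => ""
  | plen :: rest =>
    let suffixes := run.map (fun n => PySem.Str.slice n (some plen) none)
    if (PySem.Set.ofList (suffixes.map (fun s => PySem.Str.len s))).length = 1 then
      -- int(s) raising ValueError is excluded by Pre_; the .getD 0 is never reached there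
      let vals := suffixes.map (fun s => (PySem.Int.ofStr? s).getD 0)
      if pvAconsec vals then PySem.Str.slice first none (some plen)
      else pvAloop run first rest
    else pvAloop run first rest

def minimal_prefix_py (run : List String) : String :=
  match run with
  | [] => ""  -- run[0] raises IndexError; excluded by Pre_
  | r0 :: _ =>
    let width := PySem.Str.len r0
    pvAloop run r0 (PySem.List.pyRange (width - 1) (-1) (-1))

-- ===== PORT B =====
-- helper _parses(s, p): int(s[p:]) succeeds (try/except ValueError)
def pvParseOK (s : String) (p : Int) : Bool :=
  (PySem.Int.ofStr? (PySem.Str.slice s (some p) none)).isSome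

-- helper _step(a, b, p): int(b[p:]) == int(a[p:]) + 1, False on ValueError
def pvStep (a b : String) (p : Int) : Bool :=
  match PySem.Int.ofStr? (PySem.Str.slice a (some p) none),
        PySem.Int.ofStr? (PySem.Str.slice b (some p) none) with
  | some x, some y => y == x + 1
  | _, _ => false

def minimal_prefix_py_alt (run : List String) : String :=
  match run with
  | [] => ""  -- len(run[0]) raises IndexError; excluded by Pre_
  | r0 :: rs =>
    let width := PySem.Str.len r0
    if run.any (fun s => PySem.Str.len s != width) then ""
    else
      -- ok = [p for p in range(width) if _parses(run[0], p)]
      let ok0 := (PySem.List.pyRange 0 width 1).filter (fun p => pvParseOK r0 p)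
      -- for a, b in zip(run, run[1:]): ok = [p for p in ok if _step(a, b, p)]
      let ok := (run.zip rs).foldl (fun ok pr => ok.filter (fun p => pvStep pr.1 pr.2 p)) ok0
      -- return run[0][:ok[-1]] if ok else ""
      match ok.getLast? with
      | some m => PySem.Str.slice r0 none (some m)
      | none => ""

-- ===== PRECONDITION & SPEC =====
-- all suffixes at cut p parse as ints (no ValueError)
def pvParses (run : List String) (p : Int) : Bool :=
  run.all (fun s => (PySem.Int.ofStr? (PySem.Str.slice s (some p) none)).isSome)

-- value of int(s[p:]) (0 where it would raise; only used under pvParses)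
def pvVal (s : String) (p : Int) : Int :=
  (PySem.Int.ofStr? (PySem.Str.slice s (some p) none)).getD 0

-- the suffixes at cut p all parse and are consecutive integers
def pvConsecB (run : List String) (p : Int) : Bool :=
  pvParses run p &&
  (PySem.List.pyRange 0 ((run.length : Int) - 1) 1).all
    (fun i => pvVal (PySem.List.pyGetD run (i + 1) "") p
              == pvVal (PySem.List.pyGetD run i "") p + 1)

-- Pre_ excludes exactly the inputs where A raises: the empty list (IndexError on run[0]),
-- and equal-width runs where some suffix at a cut examined before any consecutive match
-- fails int() with ValueError.  (Unequal-width runs never reach int(): A returns "".)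
def Pre_minimal_prefix_py (run : List String) : Prop :=
  run ≠ [] ∧
  ((∃ s ∈ run, PySem.Str.len s ≠ PySem.Str.len (run.headD "")) ∨
   ∀ p ∈ PySem.List.pyRange 0 (PySem.Str.len (run.headD "")) 1,
     (∀ q ∈ PySem.List.pyRange 0 (PySem.Str.len (run.headD "")) 1,
        p < q → pvConsecB run q = false) → pvParses run p = true)
instance (run : List String) : Decidable (Pre_minimal_prefix_py run) := by
  unfold Pre_minimal_prefix_py; infer_instance

def pvWitness_minimal_prefix_py : List String := ["08", "09", "10"]

def Spec_minimal_prefix_py (run : List String) (out : String) : Prop := out = minimal_prefix_py_alt run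
instance (run : List String) (out : String) : Decidable (Spec_minimal_prefix_py run out) := by unfold Spec_minimal_prefix_py; infer_instance

-- ===== CLAIM (what is proved, stated in full; the proofs are below) =====
def Claim_equal_minimal_prefix_py : Prop := ∀ (run : List String), Dom_minimal_prefix_py run → Pre_minimal_prefix_py run → Spec_minimal_prefix_py run (minimal_prefix_py run)

-- ===== LEMMAS AND PROOFS =====

-- A's consecutiveness test at cut p, on the default-0 parsed values
def pvApass (run : List String) (p : Int) : Bool :=
  pvAconsec (run.map (fun s => pvVal s p))

-- B's per-cut survival test (what the pair-major filtering keeps)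
def pvOK (run : List String) (p : Int) : Bool :=
  pvParseOK (run.headD "") p && (run.zip run.tail).all (fun pr => pvStep pr.1 pr.2 p)

theorem pvSet_const {α : Type} [BEq α] [LawfulBEq α] (l : List α) (c : α)
    (hc : c ∈ l) (hall : ∀ x ∈ l, x = c) : PySem.Set.ofList l = [c] := by
  have hnd := PySem.Set.nodup_ofList l
  cases h : PySem.Set.ofList l with
  | nil =>
    exfalso
    have := (PySem.Set.mem_ofList l c).2 hc
    rw [h] at this; simp at this
  | cons a t =>
    have ha : a = c := hall a ((PySem.Set.mem_ofList l a).1 (h ▸ List.mem_cons_self ..))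
    have ht : t = [] := by
      cases t with
      | nil => rfl
      | cons b t2 =>
        exfalso
        have hb : b = c := hall b ((PySem.Set.mem_ofList l b).1 (h ▸ by simp))
        rw [h] at hnd
        simp [ha, hb] at hnd
    rw [ht, ha]

theorem pvSet_ne_one {α : Type} [BEq α] [LawfulBEq α] (l : List α) (a b : α)
    (ha : a ∈ l) (hb : b ∈ l) (hab : a ≠ b) : (PySem.Set.ofList l).length ≠ 1 := by
  intro h1
  obtain ⟨x, hx⟩ := List.length_eq_one_iff.1 h1
  have h1 : a = x := by have := (PySem.Set.mem_ofList l a).2 ha; rw [hx] at this; simpa using this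
  have h2 : b = x := by have := (PySem.Set.mem_ofList l b).2 hb; rw [hx] at this; simpa using this
  exact hab (h1.trans h2.symm)

theorem pvGetD_eq_getElem_nat (vals : List Int) (i : Nat) (h : i < vals.length) :
    vals.getD i 0 = vals[i] := List.getD_eq_getElem vals 0 h

-- A's index-based all() over the parsed values is the adjacent-step chain property
theorem pvAconsec_iff (vals : List Int) :
    pvAconsec vals = true ↔ (∀ i : Nat, i + 1 < vals.length → vals.getD (i + 1) 0 = vals.getD i 0 + 1) := by
  unfold pvAconsec
  rw [List.all_eq_true]
  constructor
  · intro hb i hi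
    have hm : (i : Int) ∈ PySem.List.pyRange 0 ((vals.length : Int) - 1) 1 :=
      PySem.List.mem_pyRange_one.2 (by omega)
    have := hb _ hm
    simp only [beq_iff_eq] at this
    rw [PySem.List.pyGetD_of_nonneg _ _ (by omega), PySem.List.pyGetD_of_nonneg _ _ (by omega)] at this
    have e1 : ((i : Int) + 1).toNat = i + 1 := by omega
    have e2 : ((i : Int)).toNat = i := by omega
    rw [e1, e2] at this
    exact this
  · intro hc j hj
    have hj' := PySem.List.mem_pyRange_one.1 hj
    simp only [beq_iff_eq]
    rw [PySem.List.pyGetD_of_nonneg _ _ (by omega), PySem.List.pyGetD_of_nonneg _ _ (by omega)]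
    have e1 : (j + 1).toNat = j.toNat + 1 := by omega
    rw [e1]
    exact hc j.toNat (by omega)

theorem pvLen_slice (s : String) (p : Int) (hp : 0 ≤ p) :
    PySem.Str.len (PySem.Str.slice s (some p) none) = ((s.toList.length - p.toNat : Nat) : Int) := by
  simp [PySem.Str.len_eq, PySem.Str.toList_slice, PySem.Chars.slice_eq_listSlice,
        PySem.List.slice_from _ hp]

theorem pvStrLen_eq (s : String) : PySem.Str.len s = (s.toList.length : Int) := by
  simp [PySem.Str.len_eq]

-- with some entry of another width, A's uniform-suffix-width test fails at every cut
theorem pvAloop_unequal (r0 s0 : String) (rs : List String)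
    (hs : s0 ∈ r0 :: rs) (hne : PySem.Str.len s0 ≠ PySem.Str.len r0) :
    ∀ L : List Int, (∀ p ∈ L, 0 ≤ p ∧ p < PySem.Str.len r0) →
      pvAloop (r0 :: rs) r0 L = "" := by
  intro L
  induction L with
  | nil => intro _; rfl
  | cons p rest ih =>
    intro hL
    obtain ⟨hp0, hpw⟩ := hL p (by simp)
    have hlen0 : PySem.Str.len (PySem.Str.slice r0 (some p) none)
        = ((r0.toList.length - p.toNat : Nat) : Int) := pvLen_slice r0 p hp0
    have hlens : PySem.Str.len (PySem.Str.slice s0 (some p) none)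
        = ((s0.toList.length - p.toNat : Nat) : Int) := pvLen_slice s0 p hp0
    have hwid : (p : Int) < (r0.toList.length : Int) := by rw [pvStrLen_eq] at hpw; omega
    have hnel : s0.toList.length ≠ r0.toList.length := by
      intro h; exact hne (by rw [pvStrLen_eq, pvStrLen_eq, h])
    have hdiff : PySem.Str.len (PySem.Str.slice s0 (some p) none)
        ≠ PySem.Str.len (PySem.Str.slice r0 (some p) none) := by
      rw [hlen0, hlens]
      intro h
      have h' : s0.toList.length - p.toNat = r0.toList.length - p.toNat := by exact_mod_cast h
      omega
    have hmem0 : PySem.Str.len (PySem.Str.slice r0 (some p) none)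
        ∈ ((r0 :: rs).map (fun n => PySem.Str.slice n (some p) none)).map (fun s => PySem.Str.len s) := by
      exact List.mem_map_of_mem (List.mem_map_of_mem (by simp))
    have hmems : PySem.Str.len (PySem.Str.slice s0 (some p) none)
        ∈ ((r0 :: rs).map (fun n => PySem.Str.slice n (some p) none)).map (fun s => PySem.Str.len s) := by
      exact List.mem_map_of_mem (List.mem_map_of_mem hs)
    have hset := pvSet_ne_one _ _ _ hmems hmem0 hdiff
    show pvAloop (r0 :: rs) r0 (p :: rest) = ""
    unfold pvAloop
    rw [if_neg hset]
    exact ih (fun q hq => hL q (by simp [hq]))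

-- one-step unfolding of A's loop (definitional)
theorem pvAloop_cons (run : List String) (first : String) (p : Int) (rest : List Int) :
    pvAloop run first (p :: rest) =
      if (PySem.Set.ofList ((run.map (fun n => PySem.Str.slice n (some p) none)).map
            (fun s => PySem.Str.len s))).length = 1 then
        if pvAconsec ((run.map (fun n => PySem.Str.slice n (some p) none)).map
            (fun s => (PySem.Int.ofStr? s).getD 0)) then
          PySem.Str.slice first none (some p)
        else pvAloop run first rest
      else pvAloop run first rest := rfl

-- with uniform widths, A's loop is find? of pvApass over the descending cut list
theorem pvAloop_find (r0 : String) (rs : List String)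
    (hw : ∀ s ∈ r0 :: rs, PySem.Str.len s = PySem.Str.len r0) :
    ∀ L : List Int, (∀ p ∈ L, 0 ≤ p ∧ p < PySem.Str.len r0) →
      pvAloop (r0 :: rs) r0 L =
        match L.find? (fun p => pvApass (r0 :: rs) p) with
        | some p => PySem.Str.slice r0 none (some p)
        | none => "" := by
  intro L
  induction L with
  | nil => intro _; rfl
  | cons p rest ih =>
    intro hL
    obtain ⟨hp0, hpw⟩ := hL p (by simp)
    -- uniform suffix widths at cut p
    have hc : ∀ x ∈ ((r0 :: rs).map (fun nn => PySem.Str.slice nn (some p) none)).map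
        (fun s => PySem.Str.len s), x = ((r0.toList.length - p.toNat : Nat) : Int) := by
      intro x hx
      obtain ⟨t, ht, rfl⟩ := List.mem_map.1 hx
      obtain ⟨s, hsmem, rfl⟩ := List.mem_map.1 ht
      rw [pvLen_slice s p hp0]
      have := hw s hsmem
      rw [pvStrLen_eq, pvStrLen_eq] at this
      have : s.toList.length = r0.toList.length := by exact_mod_cast this
      rw [this]
    have hmem0 : ((r0.toList.length - p.toNat : Nat) : Int)
        ∈ ((r0 :: rs).map (fun nn => PySem.Str.slice nn (some p) none)).map
            (fun s => PySem.Str.len s) := by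
      have h0 : PySem.Str.len (PySem.Str.slice r0 (some p) none)
          = ((r0.toList.length - p.toNat : Nat) : Int) := pvLen_slice r0 p hp0
      rw [← h0]
      exact List.mem_map_of_mem (List.mem_map_of_mem (by simp))
    have hset : (PySem.Set.ofList (((r0 :: rs).map (fun nn => PySem.Str.slice nn (some p) none)).map
        (fun s => PySem.Str.len s))).length = 1 := by
      rw [pvSet_const _ _ hmem0 hc]
      rfl
    have hv : ((r0 :: rs).map (fun nn => PySem.Str.slice nn (some p) none)).map
        (fun s => (PySem.Int.ofStr? s).getD 0) = (r0 :: rs).map (fun s => pvVal s p) := by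
      simp [List.map_map, pvVal, Function.comp]
    rw [pvAloop_cons, if_pos hset, hv]
    cases hA : pvApass (r0 :: rs) p with
    | true =>
      rw [show pvAconsec ((r0 :: rs).map (fun s => pvVal s p)) = true from hA]
      simp [List.find?, hA]
    | false =>
      rw [show pvAconsec ((r0 :: rs).map (fun s => pvVal s p)) = false from hA]
      simp only [Bool.false_eq_true, if_false, List.find?, hA]
      exact ih (fun q hq => hL q (by simp [hq]))

-- B's fold of filters collapses to one filter with the conjunction of all pair tests
theorem pvFoldFilter (prs : List (String × String)) :
    ∀ (l : List Int) (f : Int → Bool),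
      prs.foldl (fun ok pr => ok.filter (fun p => pvStep pr.1 pr.2 p)) (l.filter f)
        = l.filter (fun p => f p && prs.all (fun pr => pvStep pr.1 pr.2 p)) := by
  induction prs with
  | nil =>
    intro l f
    simp
  | cons pr t ih =>
    intro l f
    simp only [List.foldl_cons, List.filter_filter]
    rw [ih]
    apply List.filter_congr
    intro x _
    cases f x <;> cases h1 : pvStep pr.1 pr.2 x <;>
      cases h2 : t.all (fun pr => pvStep pr.1 pr.2 x) <;> simp [h1, h2]

theorem pvFind_eq_head_filter (l : List Int) (f : Int → Bool) :
    l.find? f = (l.filter f).head? := by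
  induction l with
  | nil => rfl
  | cons a t ih =>
    cases h : f a
    · rw [List.find?_cons_of_neg (by simp [h]), List.filter_cons_of_neg (by simp [h]), ih]
    · rw [List.find?_cons_of_pos h, List.filter_cons_of_pos h, List.head?_cons]

theorem pvLast_filter (l : List Int) (f : Int → Bool) :
    (l.filter f).getLast? = l.reverse.find? f := by
  rw [pvFind_eq_head_filter, List.filter_reverse, List.head?_reverse]

-- pvStep unpacked
theorem pvStep_iff (a b : String) (p : Int) :
    pvStep a b p = true ↔
      pvParseOK a p = true ∧ pvParseOK b p = true ∧ pvVal b p = pvVal a p + 1 := by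
  unfold pvStep pvParseOK pvVal
  cases PySem.Int.ofStr? (PySem.Str.slice a (some p) none) <;>
    cases PySem.Int.ofStr? (PySem.Str.slice b (some p) none) <;> simp

-- the pair-wise all over zip run run.tail, as an indexed chain over run
theorem pvZipAll_iff (p : Int) :
    ∀ (l : List String),
      ((l.zip l.tail).all (fun pr => pvStep pr.1 pr.2 p) = true) ↔
      (∀ i : Nat, i + 1 < l.length → pvStep (l.getD i "") (l.getD (i + 1) "") p = true) := by
  intro l
  induction l with
  | nil => simp
  | cons a t ih =>
    cases t with
    | nil => simp
    | cons b t2 =>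
      constructor
      · intro h i hi
        simp only [List.tail_cons, List.zip_cons_cons, List.all_cons, Bool.and_eq_true] at h
        cases i with
        | zero => exact h.1
        | succ k =>
          have := (ih.1 h.2) k (by simpa [Nat.succ_lt_succ_iff] using hi)
          simpa using this
      · intro h
        simp only [List.tail_cons, List.zip_cons_cons, List.all_cons, Bool.and_eq_true]
        refine ⟨h 0 (by simp), ih.2 ?_⟩
        intro k hk
        have := h (k + 1) (by simpa [Nat.succ_lt_succ_iff] using hk)
        simpa using this

-- the indexed chain in pvConsecB
theorem pvChainIdx_iff (run : List String) (p : Int) :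
    ((PySem.List.pyRange 0 ((run.length : Int) - 1) 1).all
      (fun i => pvVal (PySem.List.pyGetD run (i + 1) "") p
                == pvVal (PySem.List.pyGetD run i "") p + 1) = true)
    ↔ (∀ i : Nat, i + 1 < run.length →
        pvVal (run.getD (i + 1) "") p = pvVal (run.getD i "") p + 1) := by
  rw [List.all_eq_true]
  constructor
  · intro hb i hi
    have hm : (i : Int) ∈ PySem.List.pyRange 0 ((run.length : Int) - 1) 1 :=
      PySem.List.mem_pyRange_one.2 (by omega)
    have := hb _ hm
    simp only [beq_iff_eq] at this
    rw [PySem.List.pyGetD_of_nonneg _ _ (by omega), PySem.List.pyGetD_of_nonneg _ _ (by omega)] at this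
    have e1 : ((i : Int) + 1).toNat = i + 1 := by omega
    have e2 : ((i : Int)).toNat = i := by omega
    rw [e1, e2] at this
    exact this
  · intro hc j hj
    have hj' := PySem.List.mem_pyRange_one.1 hj
    simp only [beq_iff_eq]
    rw [PySem.List.pyGetD_of_nonneg _ _ (by omega), PySem.List.pyGetD_of_nonneg _ _ (by omega)]
    have e1 : (j + 1).toNat = j.toNat + 1 := by omega
    rw [e1]
    exact hc j.toNat (by omega)

-- pvApass is that same indexed chain (the map/getD bridge)
theorem pvApass_iff (run : List String) (p : Int) :
    pvApass run p = true ↔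
      (∀ i : Nat, i + 1 < run.length →
        pvVal (run.getD (i + 1) "") p = pvVal (run.getD i "") p + 1) := by
  unfold pvApass
  rw [pvAconsec_iff]
  have hlen : (run.map (fun s => pvVal s p)).length = run.length := by simp
  constructor
  · intro h i hi
    have := h i (by omega)
    rw [pvGetD_eq_getElem_nat _ _ (by omega), pvGetD_eq_getElem_nat _ _ (by omega)] at this
    simp only [List.getElem_map] at this
    rw [List.getD_eq_getElem run "" (by omega), List.getD_eq_getElem run "" (by omega)]
    exact this
  · intro h i hi
    rw [hlen] at hi
    rw [pvGetD_eq_getElem_nat _ _ (by omega), pvGetD_eq_getElem_nat _ _ (by omega)]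
    simp only [List.getElem_map]
    have := h i hi
    rw [List.getD_eq_getElem run "" (by omega), List.getD_eq_getElem run "" (by omega)] at this
    exact this

-- pvConsecB = parses && pvApass
theorem pvConsecB_eq (run : List String) (p : Int) :
    pvConsecB run p = (pvParses run p && pvApass run p) := by
  unfold pvConsecB
  cases h : pvParses run p
  · simp
  · simp only [Bool.true_and]
    cases hA : pvApass run p
    · cases hC : (PySem.List.pyRange 0 ((run.length : Int) - 1) 1).all
          (fun i => pvVal (PySem.List.pyGetD run (i + 1) "") p
                    == pvVal (PySem.List.pyGetD run i "") p + 1)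
      · rfl
      · exact absurd ((pvApass_iff run p).2 ((pvChainIdx_iff run p).1 hC)) (by simp [hA])
    · exact (pvChainIdx_iff run p).2 ((pvApass_iff run p).1 hA)

-- B's survival test equals parses && pvApass on a nonempty run
theorem pvOK_eq (r0 : String) (rs : List String) (p : Int) :
    pvOK (r0 :: rs) p = (pvParses (r0 :: rs) p && pvApass (r0 :: rs) p) := by
  rw [Bool.eq_iff_iff]
  simp only [Bool.and_eq_true]
  unfold pvOK
  simp only [List.headD_cons, List.tail_cons, Bool.and_eq_true]
  have hz := pvZipAll_iff p (r0 :: rs)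
  simp only [List.tail_cons] at hz
  rw [hz, pvApass_iff]
  constructor
  · rintro ⟨hp0, hsteps⟩
    have hparse : ∀ i : Nat, i < (r0 :: rs).length →
        pvParseOK ((r0 :: rs).getD i "") p = true := by
      intro i hi
      cases i with
      | zero => simpa using hp0
      | succ k =>
        have := (pvStep_iff _ _ p).1 (hsteps k (by omega))
        exact this.2.1
    constructor
    · rw [pvParses, List.all_eq_true]
      intro s hs
      obtain ⟨i, hi, rfl⟩ := List.mem_iff_getElem.1 hs
      have := hparse i hi
      rw [List.getD_eq_getElem _ "" hi] at this
      exact this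
    · intro i hi
      exact ((pvStep_iff _ _ p).1 (hsteps i hi)).2.2
  · rintro ⟨hpar, hchain⟩
    rw [pvParses, List.all_eq_true] at hpar
    have hparse : ∀ i : Nat, i < (r0 :: rs).length →
        pvParseOK ((r0 :: rs).getD i "") p = true := by
      intro i hi
      rw [List.getD_eq_getElem _ "" hi]
      exact hpar _ (List.getElem_mem hi)
    refine ⟨by simpa using hparse 0 (by simp), ?_⟩
    intro i hi
    exact (pvStep_iff _ _ p).2 ⟨hparse i (by omega), hparse (i + 1) hi, hchain i hi⟩

-- under Pre_'s parse condition, find? pvApass and find? pvOK coincide on descending cut lists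
theorem pvFind_eq (r0 : String) (rs : List String)
    (hpre : ∀ p ∈ PySem.List.pyRange 0 (PySem.Str.len r0) 1,
      (∀ q ∈ PySem.List.pyRange 0 (PySem.Str.len r0) 1,
        p < q → pvConsecB (r0 :: rs) q = false) → pvParses (r0 :: rs) p = true) :
    ∀ m : Nat, (m : Int) ≤ PySem.Str.len r0 →
      (∀ q : Int, (m : Int) ≤ q → q < PySem.Str.len r0 → pvApass (r0 :: rs) q = false) →
      (PySem.List.pyRange ((m : Int) - 1) (-1) (-1)).find? (fun p => pvApass (r0 :: rs) p)
        = (PySem.List.pyRange ((m : Int) - 1) (-1) (-1)).find? (fun p => pvOK (r0 :: rs) p) := by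
  intro m
  induction m with
  | zero =>
    intro _ _
    rw [PySem.List.pyRange_neg_one_eq_nil (by omega)]
    rfl
  | succ k ih =>
    intro hm hfail
    have hco : ((k + 1 : Nat) : Int) - 1 = (k : Int) := by push_cast; ring
    rw [hco, PySem.List.pyRange_neg_one_cons (by omega)]
    cases hA : pvApass (r0 :: rs) (k : Int) with
    | true =>
      -- Pre_ supplies the parses at this cut, so pvOK also holds
      have hpar : pvParses (r0 :: rs) (k : Int) = true := by
        apply hpre _ (PySem.List.mem_pyRange_one.2 (by omega))
        intro q hq hlt
        have hq' := PySem.List.mem_pyRange_one.1 hq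
        rw [pvConsecB_eq, hfail q (by omega) (by omega)]
        simp
      have hOK : pvOK (r0 :: rs) (k : Int) = true := by
        rw [pvOK_eq, hpar, hA]; rfl
      simp [List.find?, hA, hOK]
    | false =>
      have hOK : pvOK (r0 :: rs) (k : Int) = false := by
        rw [pvOK_eq, hA]; simp
      simp only [List.find?, hA, hOK]
      have := ih (by omega) (fun q h1 h2 => by
        by_cases hqk : q = (k : Int)
        · rw [hqk]; exact hA
        · exact hfail q (by omega) h2)
      rw [show ((k : Nat) : Int) - 1 = (k : Int) - 1 from rfl] at this
      exact this

theorem pvA_cons (r0 : String) (rs : List String) :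
    minimal_prefix_py (r0 :: rs)
      = pvAloop (r0 :: rs) r0 (PySem.List.pyRange (PySem.Str.len r0 - 1) (-1) (-1)) := rfl

theorem pvB_cons (r0 : String) (rs : List String) :
    minimal_prefix_py_alt (r0 :: rs)
      = if (r0 :: rs).any (fun s => PySem.Str.len s != PySem.Str.len r0) then ""
        else
          match (((r0 :: rs).zip rs).foldl (fun ok pr => ok.filter (fun p => pvStep pr.1 pr.2 p))
              ((PySem.List.pyRange 0 (PySem.Str.len r0) 1).filter (fun p => pvParseOK r0 p))).getLast? with
          | some m => PySem.Str.slice r0 none (some m)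
          | none => "" := rfl

-- ===== VERDICT (by name: the statement is the Claim_ definition above) =====
theorem minimal_prefix_py_spec : Claim_equal_minimal_prefix_py := by
  intro run _hdom hpre
  unfold Spec_minimal_prefix_py
  obtain ⟨hne, hside⟩ := hpre
  cases run with
  | nil => exact absurd rfl hne
  | cons r0 rs =>
    rw [pvA_cons, pvB_cons]
    by_cases hx : ∃ s ∈ r0 :: rs, PySem.Str.len s ≠ PySem.Str.len r0
    · obtain ⟨s0, hs0, hne0⟩ := hx
      have hany : (r0 :: rs).any (fun s => PySem.Str.len s != PySem.Str.len r0) = true :=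
        List.any_eq_true.2 ⟨s0, hs0, bne_iff_ne.2 hne0⟩
      rw [if_pos hany]
      apply pvAloop_unequal r0 s0 rs hs0 hne0
      intro p hp
      have := PySem.List.mem_pyRange_neg_one.1 hp
      omega
    · push Not at hx
      have hany : (r0 :: rs).any (fun s => PySem.Str.len s != PySem.Str.len r0) = false := by
        rw [List.any_eq_false]
        intro s hs
        rw [bne_iff_ne]
        exact fun h => h (hx s hs)
      rw [if_neg (by rw [hany]; simp)]
      have hparseCond : ∀ p ∈ PySem.List.pyRange 0 (PySem.Str.len r0) 1,
          (∀ q ∈ PySem.List.pyRange 0 (PySem.Str.len r0) 1,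
            p < q → pvConsecB (r0 :: rs) q = false) → pvParses (r0 :: rs) p = true := by
        rcases hside with h | h
        · obtain ⟨s0, hs0, hne0⟩ := h
          exact absurd (hx s0 hs0) (by simpa using hne0)
        · simpa using h
      -- A = find? pvApass on the descending cut list
      rw [pvAloop_find r0 rs hx _
        (fun p hp => by have := PySem.List.mem_pyRange_neg_one.1 hp; omega)]
      -- B = find? pvOK on the same descending cut list
      rw [pvFoldFilter]
      have hOKfun : (fun p => pvParseOK r0 p &&
          ((r0 :: rs).zip rs).all (fun pr => pvStep pr.1 pr.2 p)) = fun p => pvOK (r0 :: rs) p := by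
        funext p
        rw [pvOK]
        rfl
      rw [hOKfun, pvLast_filter]
      have hrev : (PySem.List.pyRange 0 (PySem.Str.len r0) 1).reverse
          = PySem.List.pyRange (PySem.Str.len r0 - 1) (-1) (-1) := by
        rw [PySem.List.pyRange_neg_one_eq_reverse]
        norm_num
      rw [hrev]
      have h0 : (0 : Int) ≤ PySem.Str.len r0 := by rw [pvStrLen_eq]; omega
      have hcast : (((PySem.Str.len r0).toNat : Int)) = PySem.Str.len r0 := by omega
      have hfind := pvFind_eq r0 rs hparseCond (PySem.Str.len r0).toNat (by omega)
        (fun q h1 h2 => by omega)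
      rw [hcast] at hfind
      rw [hfind]
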